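-- pv_equiv track=rewrite | github.com/ashutosh-karna/Chi-Sqr-Categorical-Distance | chi2dist/chi2distance.py | pad_lists
-- ===== SOURCE A (Python) =====
-- from collections import Counter
--
-- def pad_lists(list1, list2):
--     """
--     Checks if list1 and list2 have different levels, and pad them accordingly. List1 and List2 can be of
--     different lengths
--     :param list1: Array or list of categorical values
--     :param list2: Array or list of categorical values
--     :return: Padded lists with zeroes
--     """
--     freq1 = sorted(Counter(list1).items())
--     freq2 = sorted(Counter(list2).items())
--
--     # Get unique categories from both arrays and sort by category name
--     categories = sorted(set([category for category, count in freq1] + [category for category, count in freq2]))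
--
--     # Pad frequency distributions to have the same size across both arrays
--     freq1_padded = []
--     freq2_padded = []
--     for category in categories:
--         count1 = next((count for c, count in freq1 if c == category), 0)
--         count2 = next((count for c, count in freq2 if c == category), 0)
--         freq1_padded.append(count1)
--         freq2_padded.append(count2)
--
--     return freq1_padded, freq2_padded, categories
-- ===== SOURCE B (Python) =====
-- from collections import Counter
--
-- def pad_lists(list1, list2):
--     """Two-pointer merge of the two sorted count lists instead of union-set + per-category scans."""
--     freq1 = sorted(Counter(list1).items())
--     freq2 = sorted(Counter(list2).items())
--     freq1_padded, freq2_padded, categories = [], [], []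
--     i = j = 0
--     while i < len(freq1) and j < len(freq2):
--         c1, n1 = freq1[i]
--         c2, n2 = freq2[j]
--         if c1 == c2:
--             categories.append(c1); freq1_padded.append(n1); freq2_padded.append(n2)
--             i += 1; j += 1
--         elif c1 < c2:
--             categories.append(c1); freq1_padded.append(n1); freq2_padded.append(0)
--             i += 1
--         else:
--             categories.append(c2); freq1_padded.append(0); freq2_padded.append(n2)
--             j += 1
--     while i < len(freq1):
--         c1, n1 = freq1[i]
--         categories.append(c1); freq1_padded.append(n1); freq2_padded.append(0)
--         i += 1
--     while j < len(freq2):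
--         c2, n2 = freq2[j]
--         categories.append(c2); freq1_padded.append(0); freq2_padded.append(n2)
--         j += 1
--     return freq1_padded, freq2_padded, categories
-- ===== Notes on version B (the rewrite author's own statement) =====
-- stated objective: faster
-- what changed: Replaces the sorted-union set plus a per-category linear scan of both frequency lists with a single two-pointer merge over the two sorted count lists.
import Mathlib
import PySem

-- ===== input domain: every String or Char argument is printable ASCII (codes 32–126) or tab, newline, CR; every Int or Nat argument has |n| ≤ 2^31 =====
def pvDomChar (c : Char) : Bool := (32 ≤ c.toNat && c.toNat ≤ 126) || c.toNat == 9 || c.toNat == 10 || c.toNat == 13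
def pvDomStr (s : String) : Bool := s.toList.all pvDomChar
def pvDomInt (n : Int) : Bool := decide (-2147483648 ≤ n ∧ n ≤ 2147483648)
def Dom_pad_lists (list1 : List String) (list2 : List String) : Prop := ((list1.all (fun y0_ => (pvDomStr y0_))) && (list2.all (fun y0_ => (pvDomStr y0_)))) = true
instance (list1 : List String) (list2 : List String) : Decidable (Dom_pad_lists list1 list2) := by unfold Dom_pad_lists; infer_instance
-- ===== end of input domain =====

-- B replaces A's sorted-union set + per-category scans with one two-pointer merge of the sorted count lists (measurably faster).

-- ===== PORT A =====
-- freq1 = sorted(Counter(xs).items())  — the identical first line of both A and B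
def pvFreq (xs : List String) : List (String × Int) :=
  PySem.List.sorted2 (PySem.Dict.counter xs).items Prod.fst Prod.snd

-- next((count for c, count in freq if c == category), 0)
def pvFirstCount : List (String × Int) → String → Int
  | [], _ => 0
  | (c, count) :: t, category => if c == category then count else pvFirstCount t category

def pad_lists (list1 : List String) (list2 : List String) : List Int × List Int × List String :=
  let freq1 := pvFreq list1
  let freq2 := pvFreq list2
  let categories := PySem.List.sorted
    (PySem.Set.ofList (freq1.map Prod.fst ++ freq2.map Prod.fst)) (fun x => x) false
  let padded := categories.foldl
    (fun (acc : List Int × List Int) category =>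
      (acc.1 ++ [pvFirstCount freq1 category], acc.2 ++ [pvFirstCount freq2 category]))
    ([], [])
  (padded.1, padded.2, categories)

-- ===== PORT B =====
-- the two-pointer merge loop of Source B (the two drain while-loops are the [] cases)
def pvMerge : List (String × Int) → List (String × Int) → List Int × List Int × List String
  | [], [] => ([], [], [])
  | [], (c2, n2) :: t2 =>
    let r := pvMerge [] t2; (0 :: r.1, n2 :: r.2.1, c2 :: r.2.2)
  | (c1, n1) :: t1, [] =>
    let r := pvMerge t1 []; (n1 :: r.1, 0 :: r.2.1, c1 :: r.2.2)
  | (c1, n1) :: t1, (c2, n2) :: t2 =>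
    if c1 == c2 then
      let r := pvMerge t1 t2; (n1 :: r.1, n2 :: r.2.1, c1 :: r.2.2)
    else if c1 < c2 then
      let r := pvMerge t1 ((c2, n2) :: t2); (n1 :: r.1, 0 :: r.2.1, c1 :: r.2.2)
    else
      let r := pvMerge ((c1, n1) :: t1) t2; (0 :: r.1, n2 :: r.2.1, c2 :: r.2.2)
  termination_by f1 f2 => f1.length + f2.length

def pad_lists_alt (list1 : List String) (list2 : List String) : List Int × List Int × List String :=
  pvMerge (pvFreq list1) (pvFreq list2)

-- ===== PRECONDITION & SPEC =====
def Spec_pad_lists (list1 : List String) (list2 : List String) (out : List Int × List Int × List String) : Prop := out = pad_lists_alt list1 list2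
instance (list1 : List String) (list2 : List String) (out : List Int × List Int × List String) : Decidable (Spec_pad_lists list1 list2 out) := by unfold Spec_pad_lists; infer_instance

-- ===== CLAIM (what is proved, stated in full; the proofs are below) =====
def Claim_equal_pad_lists : Prop := ∀ (list1 : List String) (list2 : List String), Dom_pad_lists list1 list2 → Spec_pad_lists list1 list2 (pad_lists list1 list2)

-- ===== LEMMAS AND PROOFS =====

-- membership of the merged category list
theorem pvMerge_mem (f1 f2 : List (String × Int)) (c : String) :
    c ∈ (pvMerge f1 f2).2.2 ↔ c ∈ f1.map Prod.fst ∨ c ∈ f2.map Prod.fst := by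
  fun_induction pvMerge f1 f2 with
  | case1 => simp
  | case2 c2 n2 t2 r ih => simp_all; tauto
  | case3 c1 n1 t1 r ih => simp_all; tauto
  | case4 c1 n1 t1 c2 n2 t2 heq r ih =>
    simp_all
    have : c1 = c2 := by simpa using heq
    subst this; tauto
  | case5 c1 n1 t1 c2 n2 t2 heq hlt r ih => simp_all; tauto
  | case6 c1 n1 t1 c2 n2 t2 heq hlt r ih => simp_all; tauto

-- strict sortedness of the merged category list
theorem pvMerge_pairwise (f1 f2 : List (String × Int))
    (h1 : (f1.map Prod.fst).Pairwise (· < ·)) (h2 : (f2.map Prod.fst).Pairwise (· < ·)) :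
    (pvMerge f1 f2).2.2.Pairwise (· < ·) := by
  revert h1 h2
  fun_induction pvMerge f1 f2 with
  | case1 => intro _ _; simp
  | case2 c2 n2 t2 r ih =>
    intro h1 h2
    simp only [List.map_cons, List.pairwise_cons] at h2
    refine List.pairwise_cons.2 ⟨?_, ih h1 h2.2⟩
    intro x hx
    rcases (pvMerge_mem [] t2 x).1 hx with h | h
    · simp at h
    · exact h2.1 x h
  | case3 c1 n1 t1 r ih =>
    intro h1 h2
    simp only [List.map_cons, List.pairwise_cons] at h1
    refine List.pairwise_cons.2 ⟨?_, ih h1.2 h2⟩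
    intro x hx
    rcases (pvMerge_mem t1 [] x).1 hx with h | h
    · exact h1.1 x h
    · simp at h
  | case4 c1 n1 t1 c2 n2 t2 heq r ih =>
    intro h1 h2
    have hc : c1 = c2 := by simpa using heq
    simp only [List.map_cons, List.pairwise_cons] at h1 h2
    refine List.pairwise_cons.2 ⟨?_, ih h1.2 h2.2⟩
    intro x hx
    rcases (pvMerge_mem t1 t2 x).1 hx with h | h
    · exact h1.1 x h
    · exact hc ▸ h2.1 x h
  | case5 c1 n1 t1 c2 n2 t2 heq hlt r ih =>
    intro h1 h2
    simp only [List.map_cons, List.pairwise_cons] at h1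
    refine List.pairwise_cons.2 ⟨?_, ih h1.2 h2⟩
    intro x hx
    rcases (pvMerge_mem t1 ((c2, n2) :: t2) x).1 hx with h | h
    · exact h1.1 x h
    · simp only [List.map_cons, List.mem_cons] at h
      simp only [List.map_cons, List.pairwise_cons] at h2
      rcases h with rfl | h
      · exact hlt
      · exact lt_trans hlt (h2.1 x h)
  | case6 c1 n1 t1 c2 n2 t2 heq hlt r ih =>
    intro h1 h2
    have hgt : c2 < c1 := by
      rcases lt_trichotomy c1 c2 with h | h | h
      · exact absurd h hlt
      · exact absurd h (by simpa using heq)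
      · exact h
    simp only [List.map_cons, List.pairwise_cons] at h2
    refine List.pairwise_cons.2 ⟨?_, ih h1 h2.2⟩
    intro x hx
    rcases (pvMerge_mem ((c1, n1) :: t1) t2 x).1 hx with h | h
    · simp only [List.map_cons, List.mem_cons] at h
      simp only [List.map_cons, List.pairwise_cons] at h1
      rcases h with rfl | h
      · exact hgt
      · exact lt_trans hgt (h1.1 x h)
    · exact h2.1 x h

theorem pvFirstCount_not_mem (t : List (String × Int)) (c : String)
    (h : c ∉ t.map Prod.fst) : pvFirstCount t c = 0 := by
  induction t with
  | nil => rfl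
  | cons p t ih =>
    simp only [List.map_cons, List.mem_cons, not_or] at h
    obtain ⟨k, v⟩ := p
    simp only [pvFirstCount]
    have hne : ¬ (k == c) = true := by
      simp only [beq_iff_eq]
      exact fun e => h.1 e.symm
    rw [if_neg hne, ih h.2]

-- the merge equals A's per-category lookups over the merged categories
theorem pvMerge_spec (f1 f2 : List (String × Int))
    (h1 : (f1.map Prod.fst).Pairwise (· < ·)) (h2 : (f2.map Prod.fst).Pairwise (· < ·)) :
    pvMerge f1 f2 = ((pvMerge f1 f2).2.2.map (pvFirstCount f1),
                     (pvMerge f1 f2).2.2.map (pvFirstCount f2),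
                     (pvMerge f1 f2).2.2) := by
  revert h1 h2
  fun_induction pvMerge f1 f2 with
  | case1 => intro _ _; rfl
  | case2 c2 n2 t2 r ih =>
    intro h1 h2
    simp only [List.map_cons, List.pairwise_cons] at h2
    have IH := ih h1 h2.2
    refine Prod.ext ?_ (Prod.ext ?_ rfl)
    · show 0 :: (pvMerge [] t2).1 = List.map (pvFirstCount []) (c2 :: (pvMerge [] t2).2.2)
      rw [congrArg Prod.fst IH, List.map_cons]
      congr 1
    · show n2 :: (pvMerge [] t2).2.1 = List.map (pvFirstCount ((c2, n2) :: t2)) (c2 :: (pvMerge [] t2).2.2)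
      rw [congrArg (fun p => p.2.1) IH, List.map_cons,
        show pvFirstCount ((c2, n2) :: t2) c2 = n2 from by simp [pvFirstCount]]
      congr 1
      apply List.map_congr_left
      intro x hx
      rcases (pvMerge_mem [] t2 x).1 hx with h | h
      · simp at h
      · have hne : ¬ (c2 == x) = true := by simpa using ne_of_lt (h2.1 x h)
        simp [pvFirstCount, hne]
  | case3 c1 n1 t1 r ih =>
    intro h1 h2
    simp only [List.map_cons, List.pairwise_cons] at h1
    have IH := ih h1.2 h2
    refine Prod.ext ?_ (Prod.ext ?_ rfl)
    · show n1 :: (pvMerge t1 []).1 = List.map (pvFirstCount ((c1, n1) :: t1)) (c1 :: (pvMerge t1 []).2.2)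
      rw [congrArg Prod.fst IH, List.map_cons,
        show pvFirstCount ((c1, n1) :: t1) c1 = n1 from by simp [pvFirstCount]]
      congr 1
      apply List.map_congr_left
      intro x hx
      rcases (pvMerge_mem t1 [] x).1 hx with h | h
      · have hne : ¬ (c1 == x) = true := by simpa using ne_of_lt (h1.1 x h)
        simp [pvFirstCount, hne]
      · simp at h
    · show 0 :: (pvMerge t1 []).2.1 = List.map (pvFirstCount []) (c1 :: (pvMerge t1 []).2.2)
      rw [congrArg (fun p => p.2.1) IH, List.map_cons]
      congr 1
  | case4 c1 n1 t1 c2 n2 t2 heq r ih =>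
    intro h1 h2
    have hc : c1 = c2 := by simpa using heq
    subst hc
    simp only [List.map_cons, List.pairwise_cons] at h1 h2
    have IH := ih h1.2 h2.2
    have hne12 : ∀ x ∈ (pvMerge t1 t2).2.2, ¬ (c1 == x) = true := by
      intro x hx
      rcases (pvMerge_mem t1 t2 x).1 hx with h | h
      · simpa using ne_of_lt (h1.1 x h)
      · simpa using ne_of_lt (h2.1 x h)
    refine Prod.ext ?_ (Prod.ext ?_ rfl)
    · show n1 :: (pvMerge t1 t2).1 = List.map (pvFirstCount ((c1, n1) :: t1)) (c1 :: (pvMerge t1 t2).2.2)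
      rw [congrArg Prod.fst IH, List.map_cons,
        show pvFirstCount ((c1, n1) :: t1) c1 = n1 from by simp [pvFirstCount]]
      congr 1
      apply List.map_congr_left
      intro x hx
      simp [pvFirstCount, hne12 x hx]
    · show n2 :: (pvMerge t1 t2).2.1 = List.map (pvFirstCount ((c1, n2) :: t2)) (c1 :: (pvMerge t1 t2).2.2)
      rw [congrArg (fun p => p.2.1) IH, List.map_cons,
        show pvFirstCount ((c1, n2) :: t2) c1 = n2 from by simp [pvFirstCount]]
      congr 1
      apply List.map_congr_left
      intro x hx
      simp [pvFirstCount, hne12 x hx]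
  | case5 c1 n1 t1 c2 n2 t2 heq hlt r ih =>
    intro h1 h2
    simp only [List.map_cons, List.pairwise_cons] at h1
    have h2' := h2
    simp only [List.map_cons, List.pairwise_cons] at h2'
    have IH := ih h1.2 h2
    refine Prod.ext ?_ (Prod.ext ?_ rfl)
    · show n1 :: (pvMerge t1 ((c2, n2) :: t2)).1
          = List.map (pvFirstCount ((c1, n1) :: t1)) (c1 :: (pvMerge t1 ((c2, n2) :: t2)).2.2)
      rw [congrArg Prod.fst IH, List.map_cons,
        show pvFirstCount ((c1, n1) :: t1) c1 = n1 from by simp [pvFirstCount]]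
      congr 1
      apply List.map_congr_left
      intro x hx
      rcases (pvMerge_mem t1 ((c2, n2) :: t2) x).1 hx with h | h
      · have hne : ¬ (c1 == x) = true := by simpa using ne_of_lt (h1.1 x h)
        simp [pvFirstCount, hne]
      · simp only [List.map_cons, List.mem_cons] at h
        have hcx : c1 < x := by
          rcases h with rfl | h
          · exact hlt
          · exact lt_trans hlt (h2'.1 x h)
        have hne : ¬ (c1 == x) = true := by simpa using ne_of_lt hcx
        simp [pvFirstCount, hne]
    · show 0 :: (pvMerge t1 ((c2, n2) :: t2)).2.1
          = List.map (pvFirstCount ((c2, n2) :: t2)) (c1 :: (pvMerge t1 ((c2, n2) :: t2)).2.2)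
      have hzero : pvFirstCount ((c2, n2) :: t2) c1 = 0 := by
        apply pvFirstCount_not_mem
        simp only [List.map_cons, List.mem_cons, not_or]
        exact ⟨ne_of_lt hlt, fun h => absurd (lt_trans hlt (h2'.1 c1 h)) (lt_irrefl c1)⟩
      rw [congrArg (fun p => p.2.1) IH, List.map_cons, hzero]
  | case6 c1 n1 t1 c2 n2 t2 heq hlt r ih =>
    intro h1 h2
    have hgt : c2 < c1 := by
      rcases lt_trichotomy c1 c2 with h | h | h
      · exact absurd h hlt
      · exact absurd h (by simpa using heq)
      · exact h
    have h1' := h1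
    simp only [List.map_cons, List.pairwise_cons] at h1' h2
    have IH := ih h1 h2.2
    refine Prod.ext ?_ (Prod.ext ?_ rfl)
    · show 0 :: (pvMerge ((c1, n1) :: t1) t2).1
          = List.map (pvFirstCount ((c1, n1) :: t1)) (c2 :: (pvMerge ((c1, n1) :: t1) t2).2.2)
      have hzero : pvFirstCount ((c1, n1) :: t1) c2 = 0 := by
        apply pvFirstCount_not_mem
        simp only [List.map_cons, List.mem_cons, not_or]
        exact ⟨ne_of_lt hgt, fun h => absurd (lt_trans hgt (h1'.1 c2 h)) (lt_irrefl c2)⟩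
      rw [congrArg Prod.fst IH, List.map_cons, hzero]
    · show n2 :: (pvMerge ((c1, n1) :: t1) t2).2.1
          = List.map (pvFirstCount ((c2, n2) :: t2)) (c2 :: (pvMerge ((c1, n1) :: t1) t2).2.2)
      rw [congrArg (fun p => p.2.1) IH, List.map_cons,
        show pvFirstCount ((c2, n2) :: t2) c2 = n2 from by simp [pvFirstCount]]
      congr 1
      apply List.map_congr_left
      intro x hx
      rcases (pvMerge_mem ((c1, n1) :: t1) t2 x).1 hx with h | h
      · simp only [List.map_cons, List.mem_cons] at h
        have hcx : c2 < x := by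
          rcases h with rfl | h
          · exact hgt
          · exact lt_trans hgt (h1'.1 x h)
        have hne : ¬ (c2 == x) = true := by simpa using ne_of_lt hcx
        simp [pvFirstCount, hne]
      · have hne : ¬ (c2 == x) = true := by simpa using ne_of_lt (h2.1 x h)
        simp [pvFirstCount, hne]

-- sorted(Counter(xs).items()) has strictly increasing keys
-- insertBy only compares the inserted element with members of the accumulator
theorem pvInsertBy_congr {α : Type} (p q : α → α → Bool) (x : α) (acc : List α)
    (h : ∀ b ∈ acc, p x b = q x b) :
    PySem.List.insertBy p x acc = PySem.List.insertBy q x acc := by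
  induction acc with
  | nil => rfl
  | cons y ys ih =>
    rw [PySem.List.insertBy.eq_def, PySem.List.insertBy.eq_def]
    simp only
    rw [h y (List.mem_cons_self)]
    split
    · rfl
    · rw [ih (fun b hb => h b (List.mem_cons_of_mem _ hb))]

theorem pvFoldl_insertBy_congr {α : Type} (p q : α → α → Bool) (l acc : List α)
    (h : ∀ a ∈ l, ∀ b, (b ∈ acc ∨ b ∈ l) → p a b = q a b) :
    l.foldl (fun acc x => PySem.List.insertBy p x acc) acc
      = l.foldl (fun acc x => PySem.List.insertBy q x acc) acc := by
  induction l generalizing acc with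
  | nil => rfl
  | cons a t ih =>
    simp only [List.foldl_cons]
    rw [pvInsertBy_congr p q a acc
      (fun b hb => h a List.mem_cons_self b (Or.inl hb))]
    apply ih
    intro a' ha' b hb
    apply h a' (List.mem_cons_of_mem _ ha')
    rcases hb with hb | hb
    · rcases (PySem.List.mem_insertBy q a b acc).1 hb with rfl | hb
      · exact Or.inr List.mem_cons_self
      · exact Or.inl hb
    · exact Or.inr (List.mem_cons_of_mem _ hb)

-- sorting Counter items by the full pair equals sorting by the key alone (keys are distinct)
theorem pvFreq_eq_sorted (xs : List String) :
    pvFreq xs = PySem.List.sorted (PySem.Dict.counter xs).items Prod.fst false := by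
  have hform : ∀ a ∈ (PySem.Dict.counter xs).items, a = (a.1, (xs.count a.1 : Int)) := by
    rw [PySem.Dict.items_counter]
    intro a ha
    simp only [List.mem_map] at ha
    obtain ⟨k, _, rfl⟩ := ha
    rfl
  unfold pvFreq PySem.List.sorted2 PySem.List.sorted
  simp only [if_neg (Bool.false_ne_true)]
  apply pvFoldl_insertBy_congr
  intro a ha b hb
  rcases hb with hb | hb
  · simp at hb
  rcases lt_trichotomy a.1 b.1 with h | h | h
  · simp [h]
  · have : a = b := by rw [hform a ha, hform b hb, h]
    subst this
    simp
  · simp [h, not_lt_of_gt h]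

theorem pvFreq_pairwise (xs : List String) :
    ((pvFreq xs).map Prod.fst).Pairwise (· < ·) := by
  rw [pvFreq_eq_sorted]
  have hle := PySem.List.sorted_map_key_pairwise (PySem.Dict.counter xs).items Prod.fst
  have hnd : ((PySem.List.sorted (PySem.Dict.counter xs).items Prod.fst false).map Prod.fst).Nodup := by
    have hperm := (PySem.List.sorted_perm (PySem.Dict.counter xs).items Prod.fst false).map Prod.fst
    have : ((PySem.Dict.counter xs).items.map Prod.fst).Nodup := by
      rw [PySem.Dict.items_counter, List.map_map]
      have : (Prod.fst ∘ fun k : String => (k, (xs.count k : Int))) = id := rfl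
      rw [this, List.map_id]
      exact PySem.Set.nodup_ofList xs
    exact hperm.nodup_iff.2 this
  exact (hle.and hnd).imp (fun h => lt_of_le_of_ne h.1 h.2)

-- A's append-loop is a pair of maps
theorem pvLoop_eq (cats : List String) (g1 g2 : String → Int) (a1 a2 : List Int) :
    cats.foldl (fun (acc : List Int × List Int) c => (acc.1 ++ [g1 c], acc.2 ++ [g2 c])) (a1, a2)
      = (a1 ++ cats.map g1, a2 ++ cats.map g2) := by
  induction cats generalizing a1 a2 with
  | nil => simp
  | cons c t ih => simp [ih]

-- ===== VERDICT (by name: the statement is the Claim_ definition above) =====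
theorem pad_lists_spec : Claim_equal_pad_lists := by
  intro l1 l2 _
  unfold Spec_pad_lists pad_lists pad_lists_alt
  have h1 := pvFreq_pairwise l1
  have h2 := pvFreq_pairwise l2
  have hm := pvMerge_spec (pvFreq l1) (pvFreq l2) h1 h2
  have hcats : PySem.List.sorted
      (PySem.Set.ofList ((pvFreq l1).map Prod.fst ++ (pvFreq l2).map Prod.fst)) (fun x => x) false
      = (pvMerge (pvFreq l1) (pvFreq l2)).2.2 := by
    apply PySem.List.sorted_eq_of_perm_of_pairwise_lt
    · apply (List.perm_ext_iff_of_nodup ?_ ?_).2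
      · intro c
        rw [pvMerge_mem]
        simp [PySem.Set.mem_ofList]
      · exact (pvMerge_pairwise _ _ h1 h2).imp ne_of_lt
      · exact PySem.Set.nodup_ofList _
    · exact pvMerge_pairwise _ _ h1 h2
  simp only [hcats, pvLoop_eq, List.nil_append]
  exact hm.symm
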